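-- pv_equiv track=rewrite | github.com/Polyhedr/enigmath_old | public/enigmas/Manger un max de pizza/4.py | bob_dp
-- ===== SOURCE A (Python) =====
-- import time, functools
--
-- def bob_dp(pizza):
--     n = len(pizza)
--
--     def best_for_bob_after_alice_first(L):
--         m = len(L)
--
--         @functools.lru_cache(None)
--         def dp(l, r, turn):
--             if l > r:
--                 return 0
--             if turn == "Bob":
--                 if l == r:
--                     return L[l]
--                 return max(
--                     L[l] + dp(l+1, r, "Alice"),
--                     L[r] + dp(l, r-1, "Alice")
--                 )
--             else:  # Alice
--                 if l == r:
--                     return 0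
--                 return min(
--                     dp(l+1, r, "Bob"),
--                     dp(l, r-1, "Bob")
--                 )
--
--         return dp(0, m-1, "Bob")
--
--     best_bob = float("inf")
--     for i in range(n):
--         L = pizza[i+1:] + pizza[:i]
--         score_bob = best_for_bob_after_alice_first(tuple(L))
--         best_bob = min(best_bob, score_bob)
--
--     return best_bob
-- ===== SOURCE B (Python) =====
-- def bob_dp(pizza):
--     n = len(pizza)
--     d = pizza + pizza
--     m = n - 1
--     N = 2 * n
--     # layer[l] = game value of the interval d[l .. l+length-1]; length-0 layer is all zeros
--     layer = [0] * (N + 1)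
--     for length in range(1, m + 1):
--         if length % 2 == m % 2:  # Bob's turn on intervals of this length
--             layer = [max(d[l] + layer[l + 1], d[l + length - 1] + layer[l])
--                      for l in range(N - length + 1)]
--         else:                    # Alice's turn
--             layer = [min(layer[l + 1], layer[l]) for l in range(N - length + 1)]
--     return min(layer[1:n + 1])
-- ===== Notes on version B (the rewrite author's own statement) =====
-- stated objective: faster
-- what changed: Replaces A's per-rotation top-down memoized minimax recursion by an iterative bottom-up tabulation over the doubled array pizza+pizza: one rolling 1-D layer per interval length (turn derived from length parity), built with list comprehensions and shared by all rotations, so each rotation's answer is one cell of the last layer.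
-- outside the precondition, e.g. on bob_dp([]): A returns inf, B raises ValueError
import Mathlib
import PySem

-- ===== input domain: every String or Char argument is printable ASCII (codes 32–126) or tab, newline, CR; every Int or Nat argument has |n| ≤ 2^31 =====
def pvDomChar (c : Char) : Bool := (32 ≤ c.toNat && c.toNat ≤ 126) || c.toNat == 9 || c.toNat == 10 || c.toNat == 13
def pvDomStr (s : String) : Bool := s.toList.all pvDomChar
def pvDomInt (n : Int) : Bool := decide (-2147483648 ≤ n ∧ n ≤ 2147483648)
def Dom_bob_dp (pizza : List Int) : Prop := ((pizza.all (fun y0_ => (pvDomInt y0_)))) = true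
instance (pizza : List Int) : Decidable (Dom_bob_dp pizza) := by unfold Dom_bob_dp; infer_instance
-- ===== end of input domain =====

-- B replaces A's per-rotation top-down memoized minimax recursion by an iterative
-- bottom-up layer-by-length tabulation over the doubled list pizza ++ pizza, shared
-- by all rotations (objective: faster).

-- ===== PORT A =====
-- A's inner dp(l, r, turn); turn = true ↔ "Bob".  L[l] is pyGetD: in every call A
-- makes the index is in range, so the default is never read.
-- fuel = interval length (r + 1 - l); it only bounds the recursion depth
def dpAgo (L : List Int) : Nat → Int → Int → Bool → Int
  | 0, _, _, _ => 0
  | fuel + 1, l, r, turn =>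
    if l > r then 0
    else if turn then
      if l = r then PySem.List.pyGetD L l 0
      else max (PySem.List.pyGetD L l 0 + dpAgo L fuel (l + 1) r false)
               (PySem.List.pyGetD L r 0 + dpAgo L fuel l (r - 1) false)
    else
      if l = r then 0
      else min (dpAgo L fuel (l + 1) r true) (dpAgo L fuel l (r - 1) true)

def dpA (L : List Int) (l r : Int) (turn : Bool) : Int :=
  dpAgo L (r + 1 - l).toNat l r turn

-- best_bob starts at float('inf'): ported as Option Int (none = inf); the final
-- match returns 0 only when the loop never ran (pizza = []), excluded by Pre_.
def bob_dp (pizza : List Int) : Int :=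
  let n : Int := pizza.length
  let best := (PySem.List.pyRange 0 n 1).foldl (fun best i =>
      let L := PySem.List.slice pizza (some (i + 1)) none ++
               PySem.List.slice pizza none (some i)
      let score := dpA L 0 ((L.length : Int) - 1) true
      match best with
      | none => some score
      | some b => some (min b score)) none
  match best with
  | some v => v
  | none => 0

-- ===== PORT B =====
-- one pass of Source B's loop body: from the layer for intervals of length-1 build the
-- layer for intervals of the given length (the two list comprehensions)
def layerStep (d : List Int) (m N : Int) (layer : List Int) (length : Int) : List Int :=
  if PySem.Int.mod length 2 == PySem.Int.mod m 2 then
    (PySem.List.pyRange 0 (N - length + 1) 1).map (fun l =>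
      max (PySem.List.pyGetD d l 0 + PySem.List.pyGetD layer (l + 1) 0)
          (PySem.List.pyGetD d (l + length - 1) 0 + PySem.List.pyGetD layer l 0))
  else
    (PySem.List.pyRange 0 (N - length + 1) 1).map (fun l =>
      min (PySem.List.pyGetD layer (l + 1) 0) (PySem.List.pyGetD layer l 0))

-- min([]) raises ValueError in Python (pizza = [], excluded by Pre_): getD 0 there
def bob_dp_alt (pizza : List Int) : Int :=
  let n : Int := pizza.length
  let d := pizza ++ pizza
  let m := n - 1
  let N := 2 * n
  let final := (PySem.List.pyRange 1 (m + 1) 1).foldl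
      (fun layer length => layerStep d m N layer length)
      (List.replicate (N + 1).toNat 0)
  (PySem.List.min? (PySem.List.slice final (some 1) (some (n + 1))) (fun x => x)).getD 0

-- ===== PRECONDITION & SPEC =====
-- Pre_ excludes only the empty list, on which A returns float('inf') — not an int —
-- and B's min([]) raises ValueError.
def Pre_bob_dp (pizza : List Int) : Prop := pizza ≠ []
instance (pizza : List Int) : Decidable (Pre_bob_dp pizza) := by unfold Pre_bob_dp; infer_instance
def pvWitness_bob_dp : List Int := [3, -1, 4]

def Spec_bob_dp (pizza : List Int) (out : Int) : Prop := out = bob_dp_alt pizza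
instance (pizza : List Int) (out : Int) : Decidable (Spec_bob_dp pizza out) := by unfold Spec_bob_dp; infer_instance

-- ===== CLAIM (what is proved, stated in full; the proofs are below) =====
def Claim_equal_bob_dp : Prop := ∀ (pizza : List Int), Dom_bob_dp pizza → Pre_bob_dp pizza → Spec_bob_dp pizza (bob_dp pizza)

-- ===== LEMMAS AND PROOFS =====

-- proof-side reference value: the game value of d[l..r] with the mover determined
-- by interval-length parity relative to m (fuel = interval length)
def dpBgo (d : List Int) (m : Int) : Nat → Int → Int → Int
  | 0, _, _ => 0
  | fuel + 1, l, r =>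
    if l > r then 0
    else
      let bob := PySem.Int.mod (r - l + 1) 2 == PySem.Int.mod m 2
      if l = r then (if bob then PySem.List.pyGetD d l 0 else 0)
      else if bob then
        max (PySem.List.pyGetD d l 0 + dpBgo d m fuel (l + 1) r)
            (PySem.List.pyGetD d r 0 + dpBgo d m fuel l (r - 1))
      else min (dpBgo d m fuel (l + 1) r) (dpBgo d m fuel (l - 0) (r - 1))

def dpB (d : List Int) (m l r : Int) : Int :=
  dpBgo d m (r + 1 - l).toNat l r

-- proof-side intermediate program: minimum over rotations of the shared game value
def bAlt0 (pizza : List Int) : Int :=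
  if pizza = [] then 0
  else
    let n : Int := pizza.length
    let d := pizza ++ pizza
    let m := n - 1
    (PySem.List.min? ((PySem.List.pyRange 0 n 1).map
        (fun i => dpB d m (i + 1) (i + m))) (fun x => x)).getD 0

-- parity of the interval length flips when the interval shrinks by one
lemma parity_flip (a m : Int) :
    (PySem.Int.mod (a + 1) 2 == PySem.Int.mod m 2)
      = !(PySem.Int.mod a 2 == PySem.Int.mod m 2) := by
  rw [PySem.Int.mod_eq_emod_of_pos (a := a + 1) (by omega),
      PySem.Int.mod_eq_emod_of_pos (a := a) (by omega),
      PySem.Int.mod_eq_emod_of_pos (a := m) (by omega)]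
  by_cases h2 : a % 2 = m % 2
  · have h : (a + 1) % 2 ≠ m % 2 := by omega
    simp [h, h2]
  · have h : (a + 1) % 2 = m % 2 := by omega
    simp [h, h2]

-- core correspondence: A's dp on L equals the shared game value on d at offset o,
-- whenever the entries match up and the turn flag encodes the interval-length parity
lemma dpAgo_eq_dpBgo (L d : List Int) (m o : Int) :
    ∀ (fuel : Nat) (l r : Int) (turn : Bool),
      (∀ j : Int, l ≤ j → j ≤ r → PySem.List.pyGetD L j 0 = PySem.List.pyGetD d (o + j) 0) →
      turn = (PySem.Int.mod (r - l + 1) 2 == PySem.Int.mod m 2) →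
      dpAgo L fuel l r turn = dpBgo d m fuel (o + l) (o + r) := by
  intro fuel
  induction fuel with
  | zero => intro l r turn _ _; rfl
  | succ fuel ih =>
    intro l r turn hidx hturn
    rw [dpAgo, dpBgo]
    by_cases hlr : l > r
    · rw [if_pos hlr, if_pos (by omega : o + l > o + r)]
    · rw [if_neg hlr, if_neg (by omega : ¬ o + l > o + r)]
      have harg : o + r - (o + l) + 1 = r - l + 1 := by ring
      simp only [harg]
      by_cases heq : l = r
      · subst heq
        rw [if_pos rfl, if_pos rfl] at *
        rw [← hturn, hidx l le_rfl le_rfl]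
        cases turn <;> simp
      · rw [if_neg heq, if_neg (by omega : ¬ o + l = o + r)]
        have hflip : (!turn) = (PySem.Int.mod (r - l) 2 == PySem.Int.mod m 2) := by
          have := parity_flip (r - l) m
          rw [hturn, this]
          simp
        have ih1 : dpAgo L fuel (l + 1) r (!turn) = dpBgo d m fuel (o + (l + 1)) (o + r) := by
          apply ih (l + 1) r (!turn) (fun j h1 h2 => hidx j (by omega) h2)
          rw [hflip]; congr 1; ring_nf
        have ih2 : dpAgo L fuel l (r - 1) (!turn) = dpBgo d m fuel (o + l) (o + (r - 1)) := by
          apply ih l (r - 1) (!turn) (fun j h1 h2 => hidx j h1 (by omega))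
          rw [hflip]; congr 1; ring_nf
        have e1 : o + (l + 1) = o + l + 1 := by ring
        have e2 : o + (r - 1) = o + r - 1 := by ring
        rw [e1] at ih1; rw [e2] at ih2
        rw [hidx l le_rfl (by omega), hidx r (by omega) le_rfl]
        cases turn
        · simp only [Bool.not_false] at ih1 ih2
          rw [← hturn]
          simp [heq, ih1, ih2]
        · simp only [Bool.not_true] at ih1 ih2
          rw [← hturn]
          simp [ih1, ih2]

-- A's rotation pizza[i+1:] + pizza[:i] is the window [i+1, i+n-1] of pizza ++ pizza
lemma scores_eq (pizza : List Int) (i : Int) (h0 : 0 ≤ i) (hn : i < (pizza.length : Int)) :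
    dpA (PySem.List.slice pizza (some (i + 1)) none ++ PySem.List.slice pizza none (some i))
        0 (((PySem.List.slice pizza (some (i + 1)) none ++ PySem.List.slice pizza none (some i)).length : Int) - 1) true
      = dpB (pizza ++ pizza) ((pizza.length : Int) - 1) (i + 1) (i + ((pizza.length : Int) - 1)) := by
  have hs1 : PySem.List.slice pizza (some (i + 1)) none = pizza.drop (i + 1).toNat :=
    PySem.List.slice_from pizza (by omega)
  have hs2 : PySem.List.slice pizza none (some i) = pizza.take i.toNat :=
    PySem.List.slice_to pizza h0
  set L := PySem.List.slice pizza (some (i + 1)) none ++ PySem.List.slice pizza none (some i) with hL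
  have hlen : L.length = pizza.length - 1 := by
    rw [hL, hs1, hs2]; simp; omega
  have hidx : ∀ j : Int, 0 ≤ j → j ≤ (L.length : Int) - 1 →
      PySem.List.pyGetD L j 0 = PySem.List.pyGetD (pizza ++ pizza) ((i + 1) + j) 0 := by
    intro j hj0 hjr
    have hnp : 1 ≤ pizza.length := by omega
    rw [PySem.List.pyGetD_eq_getElem L 0 hj0 (by omega),
        PySem.List.pyGetD_eq_getElem (pizza ++ pizza) 0 (by omega) (by simp; omega)]
    simp only [hL, hs1, hs2]
    have hjt : j.toNat < pizza.length - 1 := by omega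
    by_cases hcase : j.toNat < pizza.length - ((i + 1).toNat)
    · rw [List.getElem_append_left (by simp; omega)]
      rw [List.getElem_drop]
      rw [List.getElem_append_left (by omega)]
      congr 1
      omega
    · rw [List.getElem_append_right (by simp; omega)]
      rw [List.getElem_take]
      rw [List.getElem_append_right (by omega)]
      congr 1
      simp
      omega
  have hturn : (true : Bool)
      = (PySem.Int.mod ((L.length : Int) - 1 - 0 + 1) 2 == PySem.Int.mod ((pizza.length : Int) - 1) 2) := by
    have : (L.length : Int) - 1 - 0 + 1 = (pizza.length : Int) - 1 := by omega
    rw [this]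
    simp
  have h := dpAgo_eq_dpBgo L (pizza ++ pizza) ((pizza.length : Int) - 1) (i + 1)
      ((L.length : Int) - 1 + 1 - 0).toNat 0 ((L.length : Int) - 1) true hidx hturn
  rw [dpA, dpB, h]
  have e1 : i + 1 + 0 = i + 1 := by ring
  have e2 : i + 1 + ((L.length : Int) - 1) = i + ((pizza.length : Int) - 1) := by omega
  have e3 : ((L.length : Int) - 1 + 1 - 0).toNat
      = (i + ((pizza.length : Int) - 1) + 1 - (i + 1)).toNat := by omega
  rw [e1, e2, e3]

-- A's running minimum with inf start, once seeded with the first score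
lemma foldl_optmin (s : Int → Int) (xs : List Int) (b : Int) :
    xs.foldl (fun best i =>
      match best with
      | none => some (s i)
      | some b => some (min b (s i))) (some b)
      = some (xs.foldl (fun b i => min b (s i)) b) := by
  induction xs generalizing b with
  | nil => rfl
  | cons x t ih => simp [List.foldl_cons, ih]

-- A equals the intermediate program (A's per-rotation dp = shared game value)
lemma A_eq_bAlt0 (pizza : List Int) (hpre : pizza ≠ []) : bob_dp pizza = bAlt0 pizza := by
  have hn : 0 < pizza.length := List.length_pos_iff.mpr hpre
  simp only [bob_dp, bAlt0, if_neg hpre]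
  rw [PySem.List.pyRange_one_cons (by exact_mod_cast hn : (0:Int) < (pizza.length : Int))]
  simp only [List.foldl_cons, List.map_cons]
  rw [foldl_optmin, PySem.List.min?_id_cons, List.foldl_map]
  simp only [Option.getD_some]
  have hsc : ∀ i : Int, 0 ≤ i → i < (pizza.length : Int) →
      dpA (PySem.List.slice pizza (some (i + 1)) none ++ PySem.List.slice pizza none (some i))
          0 (((PySem.List.slice pizza (some (i + 1)) none ++ PySem.List.slice pizza none (some i)).length : Int) - 1) true
        = dpB (pizza ++ pizza) ((pizza.length : Int) - 1) (i + 1) (i + ((pizza.length : Int) - 1)) :=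
    fun i h0 h1 => scores_eq pizza i h0 h1
  rw [hsc 0 le_rfl (by exact_mod_cast hn)]
  exact PySem.List.foldl_congr_mem _ _ _ _ (fun acc x hx => by
    have hx' := (PySem.List.mem_pyRange_one).mp hx
    rw [hsc x (by omega) (by omega)])

-- one-step unfolding of dpB on a nonempty interval
lemma dpB_unfold (d : List Int) (m l r : Int) (h : l ≤ r) :
    dpB d m l r =
      (if l = r then (if PySem.Int.mod (r - l + 1) 2 == PySem.Int.mod m 2 then PySem.List.pyGetD d l 0 else 0)
       else if PySem.Int.mod (r - l + 1) 2 == PySem.Int.mod m 2 then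
         max (PySem.List.pyGetD d l 0 + dpB d m (l + 1) r)
             (PySem.List.pyGetD d r 0 + dpB d m l (r - 1))
       else min (dpB d m (l + 1) r) (dpB d m l (r - 1))) := by
  have hf : (r + 1 - l).toNat = (r - l).toNat + 1 := by omega
  rw [dpB, hf, dpBgo, if_neg (by omega : ¬ l > r)]
  by_cases heq : l = r
  · simp [heq]
  · rw [if_neg heq, if_neg heq]
    have e1 : (r + 1 - (l + 1)).toNat = (r - l).toNat := by omega
    have e2 : (r - 1 + 1 - l).toNat = (r - l).toNat := by omega
    simp only [dpB, e1, e2, sub_zero]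

-- the layer invariant: after folding lengths 1..t, layer l holds the game value of
-- the interval d[l .. l+t-1]
lemma layer_invariant (d : List Int) (m N : Int) (t : Nat) :
    (PySem.List.pyRange 1 ((t : Int) + 1) 1).foldl
        (fun layer length => layerStep d m N layer length)
        (List.replicate (N + 1).toNat 0)
      = (PySem.List.pyRange 0 (N - (t : Int) + 1) 1).map
          (fun l => dpB d m l (l + (t : Int) - 1)) := by
  induction t with
  | zero =>
    rw [PySem.List.pyRange_one_eq_nil (by omega), List.foldl_nil]
    have hlen : (List.replicate (N + 1).toNat (0 : Int)).length
        = (PySem.List.pyRange 0 (N - 0 + 1) 1).length := by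
      rw [PySem.List.length_pyRange_one, List.length_replicate]; omega
    have : ∀ l : Int, dpB d m l (l + (0 : Int) - 1) = 0 := by
      intro l
      rw [dpB]
      have : (l + 0 - 1 + 1 - l).toNat = 0 := by omega
      rw [this, dpBgo]
    calc List.replicate (N + 1).toNat (0 : Int)
        = (PySem.List.pyRange 0 (N - 0 + 1) 1).map (fun _ => 0) := by
          rw [List.map_const', PySem.List.length_pyRange_one]
          congr 1; omega
      _ = (PySem.List.pyRange 0 (N - (0:Nat) + 1) 1).map (fun l => dpB d m l (l + (0:Nat) - 1)) := by
          push_cast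
          exact (List.map_congr_left (fun l _ => (this l).symm))
  | succ t ih =>
    have hsplit : PySem.List.pyRange 1 ((t : Int) + 1 + 1) 1
        = PySem.List.pyRange 1 ((t : Int) + 1) 1 ++ [(t : Int) + 1] := by
      exact PySem.List.pyRange_one_succ_right (show (1:Int) ≤ (t : Int) + 1 by omega)
    push_cast
    rw [hsplit, List.foldl_append, List.foldl_cons, List.foldl_nil]
    push_cast at ih
    rw [ih]
    -- one layerStep
    set f := fun l => dpB d m l (l + (t : Int) - 1) with hf
    have hget : ∀ j : Int, 0 ≤ j → j < N - (t : Int) + 1 →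
        PySem.List.pyGetD ((PySem.List.pyRange 0 (N - (t : Int) + 1) 1).map f) j 0 = f j := by
      intro j h0 h1
      exact PySem.List.pyGetD_map_pyRange_of_nonneg f (N - (t : Int) + 1) j 0 h0 h1
    rw [layerStep]
    by_cases hbob : (PySem.Int.mod ((t : Int) + 1) 2 == PySem.Int.mod m 2) = true
    · rw [if_pos hbob]
      apply List.map_congr_left
      intro l hl
      have hl' := (PySem.List.mem_pyRange_one).mp hl
      have h0 : (0 : Int) ≤ l := hl'.1
      have h1 : l < N - ((t : Int) + 1) + 1 := hl'.2
      rw [hget (l + 1) (by omega) (by omega), hget l (by omega) (by omega)]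
      simp only [hf]
      have hle : l ≤ l + ((t : Int) + 1) - 1 := by omega
      rw [dpB_unfold d m l (l + ((t : Int) + 1) - 1) hle]
      have hpar : (PySem.Int.mod (l + ((t : Int) + 1) - 1 - l + 1) 2 == PySem.Int.mod m 2) = true := by
        have e : l + ((t : Int) + 1) - 1 - l + 1 = (t : Int) + 1 := by ring
        rw [e]; exact hbob
      by_cases heq : l = l + ((t : Int) + 1) - 1
      · -- t = 0 : singleton interval, Bob takes the only slice
        have ht0 : (t : Int) = 0 := by omega
        rw [if_pos heq, if_pos hpar]
        have z1 : dpB d m (l + 1) (l + 1 + (t : Int) - 1) = 0 := by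
          rw [dpB]; have : (l + 1 + (t : Int) - 1 + 1 - (l + 1)).toNat = 0 := by omega
          rw [this, dpBgo]
        have z2 : dpB d m l (l + (t : Int) - 1) = 0 := by
          rw [dpB]; have : (l + (t : Int) - 1 + 1 - l).toNat = 0 := by omega
          rw [this, dpBgo]
        rw [z1, z2]
        have e : l + ((t : Int) + 1) - 1 = l := by omega
        rw [e]
        simp
      · rw [if_neg heq, if_pos hpar]
        have e1 : l + 1 + (t : Int) - 1 = l + ((t : Int) + 1) - 1 := by ring
        have e2 : l + (t : Int) - 1 = l + ((t : Int) + 1) - 1 - 1 := by ring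
        rw [e1, e2]
    · rw [if_neg hbob]
      apply List.map_congr_left
      intro l hl
      have hl' := (PySem.List.mem_pyRange_one).mp hl
      have h0 : (0 : Int) ≤ l := hl'.1
      have h1 : l < N - ((t : Int) + 1) + 1 := hl'.2
      rw [hget (l + 1) (by omega) (by omega), hget l (by omega) (by omega)]
      simp only [hf]
      have hle : l ≤ l + ((t : Int) + 1) - 1 := by omega
      rw [dpB_unfold d m l (l + ((t : Int) + 1) - 1) hle]
      have hpar : (PySem.Int.mod (l + ((t : Int) + 1) - 1 - l + 1) 2 == PySem.Int.mod m 2) = false := by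
        have e : l + ((t : Int) + 1) - 1 - l + 1 = (t : Int) + 1 := by ring
        rw [e]; simpa using hbob
      by_cases heq : l = l + ((t : Int) + 1) - 1
      · have ht0 : (t : Int) = 0 := by omega
        rw [if_pos heq, hpar]
        have z1 : dpB d m (l + 1) (l + 1 + (t : Int) - 1) = 0 := by
          rw [dpB]; have : (l + 1 + (t : Int) - 1 + 1 - (l + 1)).toNat = 0 := by omega
          rw [this, dpBgo]
        have z2 : dpB d m l (l + (t : Int) - 1) = 0 := by
          rw [dpB]; have : (l + (t : Int) - 1 + 1 - l).toNat = 0 := by omega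
          rw [this, dpBgo]
        rw [z1, z2]
        simp
      · rw [if_neg heq, hpar]
        simp only [Bool.false_eq_true, if_false]
        have e1 : l + 1 + (t : Int) - 1 = l + ((t : Int) + 1) - 1 := by ring
        have e2 : l + (t : Int) - 1 = l + ((t : Int) + 1) - 1 - 1 := by ring
        rw [e1, e2]

-- a slice of a comprehension over range(0, c) is the comprehension over range(a, b)
lemma slice_map_pyRange (f : Int → Int) (a b c : Int)
    (h0 : 0 ≤ a) (hab : a ≤ b) (hbc : b ≤ c) :
    PySem.List.slice ((PySem.List.pyRange 0 c 1).map f) (some a) (some b)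
      = (PySem.List.pyRange a b 1).map f := by
  have hlen : ((List.map f (PySem.List.pyRange 0 c 1)).length : Int) = c := by
    rw [List.length_map, PySem.List.length_pyRange_one]; omega
  rw [PySem.List.slice_of_nonneg _ h0 (by omega) (by omega) (by omega)]
  rw [PySem.List.pyRange_one_append 0 a c (by omega) (by omega), List.map_append]
  rw [List.drop_append_of_le_length (by rw [List.length_map, PySem.List.length_pyRange_one]; omega)]
  rw [List.drop_of_length_le (by rw [List.length_map, PySem.List.length_pyRange_one]; omega),
      List.nil_append]
  rw [PySem.List.pyRange_one_append a b c (by omega) (by omega), List.map_append]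
  rw [List.take_append_of_le_length (by rw [List.length_map, PySem.List.length_pyRange_one]; omega)]
  rw [List.take_of_length_le (by rw [List.length_map, PySem.List.length_pyRange_one]; omega)]

-- B equals the intermediate program
lemma B_eq_bAlt0 (pizza : List Int) (hpre : pizza ≠ []) : bob_dp_alt pizza = bAlt0 pizza := by
  have hn : 0 < pizza.length := List.length_pos_iff.mpr hpre
  simp only [bob_dp_alt, bAlt0, if_neg hpre]
  set n : Int := (pizza.length : Int) with hnn
  have hn1 : 1 ≤ n := by omega
  have hrange : PySem.List.pyRange 1 (n - 1 + 1) 1 = PySem.List.pyRange 1 ((((n - 1).toNat : Int)) + 1) 1 := by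
    congr 1; omega
  rw [hrange, layer_invariant (pizza ++ pizza) (n - 1) (2 * n) ((n - 1).toNat)]
  have hcast : (((n - 1).toNat : Int)) = n - 1 := by omega
  rw [hcast]
  rw [slice_map_pyRange _ 1 (n + 1) (2 * n - (n - 1) + 1) (by omega) (by omega) (by omega)]
  congr 1
  congr 1
  -- [f l for l in range(1, n+1)] = [f (i+1) for i in range(0, n)]
  rw [PySem.List.pyRange_one 1 (n + 1), PySem.List.pyRange_one 0 n, List.map_map, List.map_map]
  have hlen : (n + 1 - 1).toNat = (n - 0).toNat := by omega
  rw [hlen]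
  apply List.map_congr_left
  intro k _
  simp only [Function.comp_apply]
  have e1 : 1 + (k : Int) = 0 + (k : Int) + 1 := by ring
  rw [e1]
  congr 1
  omega

-- ===== VERDICT (by name: the statement is the Claim_ definition above) =====
theorem bob_dp_spec : Claim_equal_bob_dp := by
  intro pizza _hdom hpre
  unfold Spec_bob_dp
  rw [A_eq_bAlt0 pizza hpre, B_eq_bAlt0 pizza hpre]
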